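-- pv_equiv track=rewrite | github.com/theSharque/hamster-puzzle-solver | solver.py | blocks_to_rows
-- ===== SOURCE A (Python) =====
-- def blocks_to_rows(blocks):
--     rows = [[" ", " ", " ", " ", " ", " "],
--             [" ", " ", " ", " ", " ", " "],
--             [" ", " ", " ", " ", " ", " "],
--             [" ", " ", " ", " ", " ", " "],
--             [" ", " ", " ", " ", " ", " "],
--             [" ", " ", " ", " ", " ", " "]]
--
--     for i in range(len(blocks)):
--         if blocks[i][2] == "---":
--             rows[blocks[i][0]][blocks[i][1]] = "<"
--             rows[blocks[i][0]][blocks[i][1] + 1] = "-"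
--             rows[blocks[i][0]][blocks[i][1] + 2] = ">"
--         elif blocks[i][2] == "--":
--             rows[blocks[i][0]][blocks[i][1]] = "<"
--             rows[blocks[i][0]][blocks[i][1] + 1] = ">"
--         elif blocks[i][2] == "==":
--             rows[blocks[i][0]][blocks[i][1]] = "o"
--             rows[blocks[i][0]][blocks[i][1] + 1] = "="
--         elif blocks[i][2] == "!!!":
--             rows[blocks[i][0]][blocks[i][1]] = "n"
--             rows[blocks[i][0] + 1][blocks[i][1]] = "!"
--             rows[blocks[i][0] + 2][blocks[i][1]] = "u"
--         elif blocks[i][2] == "!!":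
--             rows[blocks[i][0]][blocks[i][1]] = "n"
--             rows[blocks[i][0] + 1][blocks[i][1]] = "u"
--     return rows
-- ===== SOURCE B (Python) =====
-- # Per-cell "pull" instead of per-block "push": each of the 36 grid cells is
-- # computed independently by scanning the blocks in reverse for the most recent
-- # block that writes that cell (last write wins, as in A's sequential mutation).
-- def _cell(r, c, blocks):
--     for br, bc, t in reversed(blocks):
--         dr, dc = r - br, c - bc
--         if t == "---" and dr == 0:
--             if dc == 0:
--                 return "<"
--             if dc == 1:
--                 return "-"
--             if dc == 2:
--                 return ">"
--         elif t == "--" and dr == 0: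
--             if dc == 0:
--                 return "<"
--             if dc == 1:
--                 return ">"
--         elif t == "==" and dr == 0:
--             if dc == 0:
--                 return "o"
--             if dc == 1:
--                 return "="
--         elif t == "!!!" and dc == 0:
--             if dr == 0:
--                 return "n"
--             if dr == 1:
--                 return "!"
--             if dr == 2:
--                 return "u"
--         elif t == "!!" and dc == 0:
--             if dr == 0:
--                 return "n"
--             if dr == 1:
--                 return "u"
--     return " "
--
--
-- def blocks_to_rows(blocks):
--     return [[_cell(r, c, blocks) for c in range(6)] for r in range(6)]
-- ===== Notes on version B (the rewrite author's own statement) =====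
-- stated objective: alternative
-- what changed: Inverts the traversal: instead of A's per-block pushes mutating a 6x6 grid, B computes each of the 36 cells independently by scanning the block list in reverse for the most recent block that writes that cell (last write wins), with no mutable grid at all.
import Mathlib
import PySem

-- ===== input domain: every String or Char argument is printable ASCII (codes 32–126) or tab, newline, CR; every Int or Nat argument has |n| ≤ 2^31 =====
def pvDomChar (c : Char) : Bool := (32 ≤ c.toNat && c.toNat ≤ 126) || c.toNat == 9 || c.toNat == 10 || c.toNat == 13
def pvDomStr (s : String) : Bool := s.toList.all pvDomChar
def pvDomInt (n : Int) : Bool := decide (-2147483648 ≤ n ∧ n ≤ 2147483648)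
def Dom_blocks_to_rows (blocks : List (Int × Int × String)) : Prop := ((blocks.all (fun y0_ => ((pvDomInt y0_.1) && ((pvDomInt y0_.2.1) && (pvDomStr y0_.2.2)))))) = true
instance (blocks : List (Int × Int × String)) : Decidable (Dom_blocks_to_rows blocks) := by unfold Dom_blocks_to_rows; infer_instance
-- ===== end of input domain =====

-- B inverts A's traversal: instead of per-block writes mutating a 6x6 grid, each
-- of the 36 cells is computed independently by a reverse scan of the block list
-- for the most recent block writing that cell (objective: alternative).

-- ===== PORT A =====
-- rows[r][c] = v for nonnegative in-range r, c (the only indices Pre_ admits)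
def pvSetCell (rows : List (List String)) (r c : Int) (v : String) : List (List String) :=
  rows.set r.toNat ((rows.getD r.toNat []).set c.toNat v)

def pvInit : List (List String) :=
  [[" ", " ", " ", " ", " ", " "],
   [" ", " ", " ", " ", " ", " "],
   [" ", " ", " ", " ", " ", " "],
   [" ", " ", " ", " ", " ", " "],
   [" ", " ", " ", " ", " ", " "],
   [" ", " ", " ", " ", " ", " "]]

def pvStepA (rows : List (List String)) (b : Int × Int × String) : List (List String) :=
  if b.2.2 = "---" then
    pvSetCell (pvSetCell (pvSetCell rows b.1 b.2.1 "<") b.1 (b.2.1 + 1) "-") b.1 (b.2.1 + 2) ">"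
  else if b.2.2 = "--" then
    pvSetCell (pvSetCell rows b.1 b.2.1 "<") b.1 (b.2.1 + 1) ">"
  else if b.2.2 = "==" then
    pvSetCell (pvSetCell rows b.1 b.2.1 "o") b.1 (b.2.1 + 1) "="
  else if b.2.2 = "!!!" then
    pvSetCell (pvSetCell (pvSetCell rows b.1 b.2.1 "n") (b.1 + 1) b.2.1 "!") (b.1 + 2) b.2.1 "u"
  else if b.2.2 = "!!" then
    pvSetCell (pvSetCell rows b.1 b.2.1 "n") (b.1 + 1) b.2.1 "u"
  else rows

def blocks_to_rows (blocks : List (Int × Int × String)) : List (List String) :=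
  blocks.foldl pvStepA pvInit

-- ===== PORT B =====
-- one iteration of _cell's loop body: does this block write cell (r, c)?
def pvHit (r c : Int) (b : Int × Int × String) : Option String :=
  let dr := r - b.1
  let dc := c - b.2.1
  if b.2.2 = "---" ∧ dr = 0 then
    if dc = 0 then some "<" else if dc = 1 then some "-" else if dc = 2 then some ">" else none
  else if b.2.2 = "--" ∧ dr = 0 then
    if dc = 0 then some "<" else if dc = 1 then some ">" else none
  else if b.2.2 = "==" ∧ dr = 0 then
    if dc = 0 then some "o" else if dc = 1 then some "=" else none
  else if b.2.2 = "!!!" ∧ dc = 0 then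
    if dr = 0 then some "n" else if dr = 1 then some "!" else if dr = 2 then some "u" else none
  else if b.2.2 = "!!" ∧ dc = 0 then
    if dr = 0 then some "n" else if dr = 1 then some "u" else none
  else none

-- _cell's loop over the (already reversed) block list
def pvCell (r c : Int) : List (Int × Int × String) → String
  | [] => " "
  | b :: rest =>
    match pvHit r c b with
    | some ch => ch
    | none => pvCell r c rest

def blocks_to_rows_alt (blocks : List (Int × Int × String)) : List (List String) :=
  (PySem.List.pyRange 0 6 1).map (fun r =>
    (PySem.List.pyRange 0 6 1).map (fun c => pvCell r c blocks.reverse))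

-- ===== PRECONDITION & SPEC =====
def pvOk (i : Int) : Prop := 0 ≤ i ∧ i < 6

-- Per-block condition: every cell the block writes lies on the 6x6 board.
def pvPreB (b : Int × Int × String) : Prop :=
  (b.2.2 = "---" → pvOk b.1 ∧ pvOk b.2.1 ∧ pvOk (b.2.1 + 1) ∧ pvOk (b.2.1 + 2)) ∧
  (b.2.2 = "--" → pvOk b.1 ∧ pvOk b.2.1 ∧ pvOk (b.2.1 + 1)) ∧
  (b.2.2 = "==" → pvOk b.1 ∧ pvOk b.2.1 ∧ pvOk (b.2.1 + 1)) ∧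
  (b.2.2 = "!!!" → pvOk b.1 ∧ pvOk (b.1 + 1) ∧ pvOk (b.1 + 2) ∧ pvOk b.2.1) ∧
  (b.2.2 = "!!" → pvOk b.1 ∧ pvOk (b.1 + 1) ∧ pvOk b.2.1)

-- Pre_ restricts to the natural domain: every written cell at board coordinates 0..5.
-- It excludes blocks with coordinates in -6..-1, where A returns a grid written via
-- Python's negative-index wraparound (an artefact) while B drops off-board writes,
-- and coordinates beyond the board, where A raises IndexError.
def Pre_blocks_to_rows (blocks : List (Int × Int × String)) : Prop :=
  ∀ b ∈ blocks, pvPreB b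

instance (blocks : List (Int × Int × String)) : Decidable (Pre_blocks_to_rows blocks) := by
  haveI : DecidablePred pvPreB := fun b => by
    unfold pvPreB pvOk
    refine @instDecidableAnd _ _ ?_ (@instDecidableAnd _ _ ?_ (@instDecidableAnd _ _ ?_
      (@instDecidableAnd _ _ ?_ ?_))) <;> infer_instance
  unfold Pre_blocks_to_rows; exact List.decidableBAll _ blocks

def pvWitness_blocks_to_rows : List (Int × Int × String) :=
  [(0, 0, "---"), (2, 3, "=="), (3, 5, "!!!"), (1, 4, "--"), (4, 0, "!!"), (5, 5, "??")]

def Spec_blocks_to_rows (blocks : List (Int × Int × String)) (out : List (List String)) : Prop :=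
  out = blocks_to_rows_alt blocks
instance (blocks : List (Int × Int × String)) (out : List (List String)) :
    Decidable (Spec_blocks_to_rows blocks out) := by unfold Spec_blocks_to_rows; infer_instance

-- ===== CLAIM (what is proved, stated in full; the proofs are below) =====
def Claim_equal_blocks_to_rows : Prop :=
  ∀ (blocks : List (Int × Int × String)), Dom_blocks_to_rows blocks →
    Pre_blocks_to_rows blocks → Spec_blocks_to_rows blocks (blocks_to_rows blocks)

-- ===== LEMMAS AND PROOFS =====
-- render a cell function into the concrete 6x6 grid (proof-side view of B's output)
def pvRenderF (f : Int → Int → String) : List (List String) :=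
  (PySem.List.pyRange 0 6 1).map (fun r =>
    (PySem.List.pyRange 0 6 1).map (fun c => f r c))

lemma pvRenderF_congr {f g : Int → Int → String}
    (h : ∀ r c, pvOk r → pvOk c → f r c = g r c) : pvRenderF f = pvRenderF g := by
  simp only [pvRenderF, show PySem.List.pyRange 0 6 1 = [0, 1, 2, 3, 4, 5] from by decide,
    List.map]
  repeat rw [h _ _ (by constructor <;> norm_num) (by constructor <;> norm_num)]

lemma pvSet_renderF (f : Int → Int → String) (r c : Int) (v : String)
    (hr : pvOk r) (hc : pvOk c) :
    pvSetCell (pvRenderF f) r c v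
      = pvRenderF (fun r' c' => if r' = r ∧ c' = c then v else f r' c') := by
  obtain ⟨hr0, hr6⟩ := hr
  obtain ⟨hc0, hc6⟩ := hc
  simp only [pvRenderF, pvSetCell,
    show PySem.List.pyRange 0 6 1 = [0, 1, 2, 3, 4, 5] from by decide]
  interval_cases r <;> interval_cases c <;>
    simp [List.set, List.getD]

set_option maxHeartbeats 1000000 in
lemma pvStep_eq (f : Int → Int → String) (b : Int × Int × String) (hb : pvPreB b) :
    pvStepA (pvRenderF f) b
      = pvRenderF (fun r c =>
          match pvHit r c b with
          | some ch => ch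
          | none => f r c) := by
  obtain ⟨r0, c0, t⟩ := b
  obtain ⟨h1, h2, h3, h4, h5⟩ := hb
  unfold pvStepA
  by_cases e1 : t = "---"
  · obtain ⟨a1, a2, a3, a4⟩ := h1 e1
    subst e1
    simp only [String.reduceEq, reduceIte]
    rw [pvSet_renderF _ _ _ _ a1 a2, pvSet_renderF _ _ _ _ a1 a3, pvSet_renderF _ _ _ _ a1 a4]
    refine pvRenderF_congr (fun r c _ _ => ?_)
    simp only [pvHit, String.reduceEq, true_and, false_and, reduceIte]
    split_ifs <;> first | rfl | omega
  · by_cases e2 : t = "--"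
    · obtain ⟨a1, a2, a3⟩ := h2 e2
      subst e2
      simp only [String.reduceEq, reduceIte]
      rw [pvSet_renderF _ _ _ _ a1 a2, pvSet_renderF _ _ _ _ a1 a3]
      refine pvRenderF_congr (fun r c _ _ => ?_)
      simp only [pvHit, String.reduceEq, true_and, false_and, reduceIte]
      split_ifs <;> first | rfl | omega
    · by_cases e3 : t = "=="
      · obtain ⟨a1, a2, a3⟩ := h3 e3
        subst e3
        simp only [String.reduceEq, reduceIte]
        rw [pvSet_renderF _ _ _ _ a1 a2, pvSet_renderF _ _ _ _ a1 a3]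
        refine pvRenderF_congr (fun r c _ _ => ?_)
        simp only [pvHit, String.reduceEq, true_and, false_and, reduceIte]
        split_ifs <;> first | rfl | omega
      · by_cases e4 : t = "!!!"
        · obtain ⟨a1, a2, a3, a4⟩ := h4 e4
          subst e4
          simp only [String.reduceEq, reduceIte]
          rw [pvSet_renderF _ _ _ _ a1 a4, pvSet_renderF _ _ _ _ a2 a4,
              pvSet_renderF _ _ _ _ a3 a4]
          refine pvRenderF_congr (fun r c _ _ => ?_)
          simp only [pvHit, String.reduceEq, true_and, false_and, reduceIte]
          split_ifs <;> first | rfl | omega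
        · by_cases e5 : t = "!!"
          · obtain ⟨a1, a2, a3⟩ := h5 e5
            subst e5
            simp only [String.reduceEq, reduceIte]
            rw [pvSet_renderF _ _ _ _ a1 a3, pvSet_renderF _ _ _ _ a2 a3]
            refine pvRenderF_congr (fun r c _ _ => ?_)
            simp only [pvHit, String.reduceEq, true_and, false_and, reduceIte]
            split_ifs <;> first | rfl | omega
          · simp only [if_neg e1, if_neg e2, if_neg e3, if_neg e4, if_neg e5]
            refine pvRenderF_congr (fun r c _ _ => ?_)
            simp only [pvHit, e1, e2, e3, e4, e5, false_and, if_false]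

lemma pvLoop_eq (blocks : List (Int × Int × String)) (h : ∀ b ∈ blocks, pvPreB b) :
    blocks.foldl pvStepA pvInit = pvRenderF (fun r c => pvCell r c blocks.reverse) := by
  induction blocks using List.reverseRecOn with
  | nil => decide
  | append_singleton bs b ih =>
      rw [List.foldl_append, List.foldl_cons, List.foldl_nil,
          ih (fun x hx => h x (by simp [hx])),
          pvStep_eq _ b (h b (by simp))]
      refine pvRenderF_congr (fun r c _ _ => ?_)
      simp [pvCell]

-- ===== VERDICT (by name: the statement is the Claim_ definition above) =====
theorem blocks_to_rows_spec : Claim_equal_blocks_to_rows := by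
  intro blocks _ hpre
  unfold Spec_blocks_to_rows blocks_to_rows blocks_to_rows_alt
  rw [pvLoop_eq blocks hpre]
  rfl
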